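-- pv_equiv track=rewrite | github.com/graphite/AOC2023 | day13/13-1.py | check
-- ===== SOURCE A (Python) =====
-- def check(row):
--     for i in range(len(row) - 1):
--         if (len(row) - i) % 2 == 1:
--             continue
--         for j in range((len(row)-i) // 2):
--             if row[j + i] != row[len(row) - 1 - j]:
--                 break
--         else:
--             return i + (len(row) - i) // 2
--     return 0
-- ===== SOURCE B (Python) =====
-- def check(row):
--     n = len(row)
--     rev = row[::-1]
--     best = 0
--     for h in range(1, n // 2 + 1):
--         # only a start matching the last element can open a palindromic suffix
--         if row[n - 2*h] == row[n - 1] and row[n - 2*h:] == rev[:2*h]: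
--             best = h
--     return n - best if best else 0
-- ===== Notes on version B (the rewrite author's own statement) =====
-- stated objective: alternative
-- what changed: B builds the reversed list once and tests each even-length suffix by a candidate pre-filter (its start must equal the last element) followed by wholesale slice equality against a prefix of the reverse, scanning half-lengths ascending with a best-so-far accumulator and no early exit, instead of A's suffix-start loop with parity skip and elementwise inner scan with break/else.
import Mathlib
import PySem

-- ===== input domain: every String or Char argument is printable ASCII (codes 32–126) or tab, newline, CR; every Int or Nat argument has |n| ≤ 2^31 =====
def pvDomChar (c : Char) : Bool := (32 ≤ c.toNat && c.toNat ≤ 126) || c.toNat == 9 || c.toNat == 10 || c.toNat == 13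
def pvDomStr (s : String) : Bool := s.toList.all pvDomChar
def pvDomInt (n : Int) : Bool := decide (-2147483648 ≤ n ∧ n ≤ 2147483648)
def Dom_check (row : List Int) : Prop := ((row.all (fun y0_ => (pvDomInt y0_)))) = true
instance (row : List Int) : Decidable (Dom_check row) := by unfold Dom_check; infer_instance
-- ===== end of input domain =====

-- B builds the reversed list once and tests each even-length suffix by wholesale slice
-- equality against a prefix of the reverse (half-lengths scanned ascending with a
-- best-so-far accumulator, no early exit), instead of A's suffix-start loop with its
-- parity skip and its elementwise inner scan with break/else; objective: alternative.

-- ===== PORT A =====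
-- inner for-j loop with break/else: short-circuit .all = 'all pairs equal, else break'.
-- Python indices j+i and len(row)-1-j are always in range here, so getD is exact.
def checkInnerAll (row : List Int) (n i : Nat) : Bool :=
  (List.range ((n - i) / 2)).all (fun j => row.getD (j + i) 0 == row.getD (n - 1 - j) 0)

def checkALoop (row : List Int) (n : Nat) : List Nat → Int
  | [] => 0
  | i :: rest =>
    if (n - i) % 2 == 1 then checkALoop row n rest
    else if checkInnerAll row n i then ((i + (n - i) / 2 : Nat) : Int)
    else checkALoop row n rest

def check (row : List Int) : Int :=
  checkALoop row row.length (List.range (row.length - 1))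

-- ===== PORT B =====
-- row[::-1] is List.reverse (PySem.List.slice?_none_none_neg_one);
-- row[n-2h:] with 0 ≤ n-2h is List.drop and rev[:2h] is List.take
-- (PySem.List.slice_from_natCast / slice_to_natCast) — both exact here;
-- range(1, n//2+1) is List.range' 1 (n/2); the indices n-2h and n-1 are
-- in range on every h the loop visits, so getD is exact for row[...].
def check_alt (row : List Int) : Int :=
  let n := row.length
  let rev := row.reverse
  let best := (List.range' 1 (n / 2)).foldl
    (fun best h =>
      if (row.getD (n - 2 * h) 0 == row.getD (n - 1) 0) &&
          (row.drop (n - 2 * h) == rev.take (2 * h)) then h else best) 0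
  if best ≠ 0 then (n : Int) - (best : Int) else 0

-- ===== PRECONDITION & SPEC =====
def Spec_check (row : List Int) (out : Int) : Prop := out = check_alt row
instance (row : List Int) (out : Int) : Decidable (Spec_check row out) := by unfold Spec_check; infer_instance

-- ===== CLAIM (what is proved, stated in full; the proofs are below) =====
def Claim_equal_check : Prop := ∀ (row : List Int), Dom_check row → Spec_check row (check row)

-- ===== LEMMAS AND PROOFS =====

-- the even suffix-palindrome test B performs at half-length h
def innerP (row : List Int) (h : Nat) : Bool :=
  (row.getD (row.length - 2 * h) 0 == row.getD (row.length - 1) 0) &&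
  (row.drop (row.length - 2 * h) == row.reverse.take (2 * h))

-- greatest h in [1, m] with innerP row h, else 0
def bestOf (row : List Int) : Nat → Nat
  | 0 => 0
  | m + 1 => if innerP row (m + 1) then m + 1 else bestOf row m

-- B's fold computes bestOf
lemma fold_eq_bestOf (row : List Int) (m : Nat) :
    (List.range' 1 m).foldl
      (fun best h =>
        if (row.getD (row.length - 2 * h) 0 == row.getD (row.length - 1) 0) &&
            (row.drop (row.length - 2 * h) == row.reverse.take (2 * h)) then h else best) 0
      = bestOf row m := by
  suffices hgen : ∀ m acc, (List.range' 1 m).foldl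
      (fun best h =>
        if (row.getD (row.length - 2 * h) 0 == row.getD (row.length - 1) 0) &&
            (row.drop (row.length - 2 * h) == row.reverse.take (2 * h)) then h else best) acc
      = if bestOf row m = 0 then acc else bestOf row m by
    rw [hgen]; split <;> simp_all
  intro m
  induction m with
  | zero => intro acc; simp [bestOf]
  | succ m ih =>
    intro acc
    rw [List.range'_concat, List.foldl_append, ih]
    simp only [List.foldl_cons, List.foldl_nil, one_mul]
    rw [Nat.add_comm 1 m]
    have hb : bestOf row (m + 1) =
        if ((row.getD (row.length - 2 * (m + 1)) 0 == row.getD (row.length - 1) 0) &&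
            (row.drop (row.length - 2 * (m + 1)) == row.reverse.take (2 * (m + 1)))) = true
        then m + 1 else bestOf row m := rfl
    rw [hb]
    by_cases hp : ((row.getD (row.length - 2 * (m + 1)) 0 == row.getD (row.length - 1) 0) &&
        (row.drop (row.length - 2 * (m + 1)) == row.reverse.take (2 * (m + 1)))) = true
    · simp only [if_pos hp]
      rw [if_neg (Nat.succ_ne_zero m)]
    · simp only [if_neg hp]

-- getD bridges: drop/take/reverse read through to the base list
lemma getD_drop (l : List Int) (a t : Nat) : (l.drop a).getD t 0 = l.getD (a + t) 0 := by
  simp [List.getD_eq_getElem?_getD, List.getElem?_drop]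

lemma getD_take (l : List Int) (b t : Nat) (ht : t < b) :
    (l.take b).getD t 0 = l.getD t 0 := by
  simp [List.getD_eq_getElem?_getD, ht]

lemma getD_reverse (l : List Int) (t : Nat) (ht : t < l.length) :
    l.reverse.getD t 0 = l.getD (l.length - 1 - t) 0 := by
  rw [List.getD_eq_getElem?_getD, List.getD_eq_getElem?_getD,
    List.getElem?_eq_getElem (by simpa using ht), List.getElem?_eq_getElem (by omega)]
  simp [List.getElem_reverse]

-- lists of the same length are equal iff they agree at every getD position
lemma eq_iff_getD (l1 l2 : List Int) (hl : l1.length = l2.length) :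
    l1 = l2 ↔ ∀ t, t < l1.length → l1.getD t 0 = l2.getD t 0 := by
  constructor
  · intro he t _; rw [he]
  · intro hp
    apply List.ext_getElem hl
    intro t h1 h2
    have := hp t h1
    rwa [List.getD_eq_getElem?_getD, List.getD_eq_getElem?_getD,
      List.getElem?_eq_getElem h1, List.getElem?_eq_getElem h2] at this

-- A's elementwise half scan at i = n - 2h agrees with B's slice-equality test
lemma inner_eq (row : List Int) (h : Nat) (h1 : 1 ≤ h) (h2 : 2 * h ≤ row.length) :
    checkInnerAll row row.length (row.length - 2 * h) = innerP row h := by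
  have hdiv : (row.length - (row.length - 2 * h)) / 2 = h := by omega
  rw [Bool.eq_iff_iff]
  unfold checkInnerAll innerP
  rw [hdiv, Bool.and_eq_true, beq_iff_eq, beq_iff_eq,
    eq_iff_getD _ _ (by simp; omega),
    show (row.drop (row.length - 2 * h)).length = 2 * h from by simp; omega]
  simp only [List.all_eq_true, List.mem_range, beq_iff_eq]
  constructor
  · intro hall
    refine ⟨?_, ?_⟩
    · have := hall 0 (by omega)
      rwa [Nat.zero_add, Nat.sub_zero] at this
    · intro t ht
      rw [getD_drop, getD_take _ _ _ ht, getD_reverse _ _ (by omega)]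
      by_cases htl : t < h
      · have := hall t htl
        rwa [Nat.add_comm t] at this
      · have := hall (2 * h - 1 - t) (by omega)
        rw [show 2 * h - 1 - t + (row.length - 2 * h) = row.length - 1 - t from by omega,
          show row.length - 1 - (2 * h - 1 - t) = row.length - 2 * h + t from by omega] at this
        exact this.symm
  · rintro ⟨-, heq⟩ j hj
    have := heq j (by omega)
    rw [getD_drop, getD_take _ _ _ (by omega), getD_reverse _ _ (by omega)] at this
    rwa [Nat.add_comm j]

-- A's outer loop over the last k suffix starts returns n - bestOf ⌊(k+1)/2⌋ (0 if none)
lemma aloop_eq (row : List Int) :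
    ∀ k, k ≤ row.length - 1 →
      checkALoop row row.length (List.range' (row.length - 1 - k) k) =
        (if bestOf row ((k + 1) / 2) = 0 then 0
         else (row.length : Int) - (bestOf row ((k + 1) / 2) : Int)) := by
  intro k
  induction k with
  | zero => intro _; simp [checkALoop, bestOf]
  | succ k ih =>
    intro hk
    have hrow : k + 2 ≤ row.length := by omega
    have hcons : List.range' (row.length - 1 - (k + 1)) (k + 1) =
        (row.length - k - 2) :: List.range' (row.length - 1 - k) k := by
      have e1 : row.length - 1 - (k + 1) = row.length - k - 2 := by omega
      have e2 : row.length - 1 - (k + 1) + 1 = row.length - 1 - k := by omega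
      rw [List.range'_succ, e2, e1]
    rw [hcons, checkALoop]
    rw [show row.length - (row.length - k - 2) = k + 2 from by omega]
    by_cases hodd : (k + 2) % 2 = 1
    · rw [if_pos (by simpa using hodd), ih (by omega),
        show (k + 1 + 1) / 2 = (k + 1) / 2 from by omega]
    · have hev : (k + 2) % 2 = 0 := by omega
      rw [if_neg (by simpa using hodd)]
      have hh : k + 2 = 2 * ((k + 2) / 2) := by omega
      rw [show row.length - k - 2 = row.length - 2 * ((k + 2) / 2) from by omega,
        inner_eq row ((k + 2) / 2) (by omega) (by omega)]
      have hbest : bestOf row ((k + 1 + 1) / 2) =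
          if innerP row ((k + 2) / 2) then (k + 2) / 2 else bestOf row ((k + 1) / 2) := by
        rw [show (k + 1 + 1) / 2 = ((k + 2) / 2 - 1) + 1 from by omega, bestOf,
          show (k + 2) / 2 - 1 + 1 = (k + 2) / 2 from by omega,
          show (k + 1) / 2 = (k + 2) / 2 - 1 from by omega]
      by_cases hp : innerP row ((k + 2) / 2)
      · rw [if_pos hp, hbest, if_pos hp, if_neg (by omega)]
        omega
      · rw [if_neg hp, ih (by omega), hbest, if_neg hp]

-- ===== VERDICT (by name: the statement is the Claim_ definition above) =====
theorem check_spec : Claim_equal_check := by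
  intro row _
  unfold Spec_check check check_alt
  simp only []
  rw [fold_eq_bestOf, List.range_eq_range']
  have h := aloop_eq row (row.length - 1) le_rfl
  rw [Nat.sub_self, show (row.length - 1 + 1) / 2 = row.length / 2 from by omega] at h
  rw [h]
  by_cases hb : bestOf row (row.length / 2) = 0
  · rw [if_pos hb, if_neg (by simp [hb])]
  · rw [if_neg hb, if_pos hb]
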